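-- pv_equiv track=rewrite | github.com/MarcAntoineLebourgeois/personal-sudoku-solver | is_candidate_in_both_other_row.py | is_candidate_in_both_other_row
-- ===== SOURCE A (Python) =====
-- def is_candidate_in_both_other_row(grid_to_check, rows_to_check, candidate):
--     first_row_candidates = []
--     second_row_candidates = []
--     for row in rows_to_check:
--         for column in range(3):
--             if (row == rows_to_check[0] and len(grid_to_check[row][column]) > 0):
--                 first_row_candidates.extend(grid_to_check[row][column])
--             if (row == rows_to_check[1] and len(grid_to_check[row][column]) > 0):
--                 second_row_candidates.extend(grid_to_check[row][column])
--     is_candidate_in_first_row = candidate in first_row_candidates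
--     is_candidate_in_second_row = candidate in second_row_candidates
--     is_candidate_in_both_other_row = is_candidate_in_first_row and is_candidate_in_second_row
--     return is_candidate_in_both_other_row
-- ===== SOURCE B (Python) =====
-- def is_candidate_in_both_other_row(grid_to_check, rows_to_check, candidate):
--     row_0 = rows_to_check[0]
--     row_1 = rows_to_check[1]
--     in_first = any(candidate in grid_to_check[row_0][column] for column in range(3))
--     in_second = any(candidate in grid_to_check[row_1][column] for column in range(3))
--     return in_first and in_second
-- ===== Notes on version B (the rewrite author's own statement) =====
-- stated objective: simpler
-- what changed: B drops A's two materialized candidate lists and the equality-dispatch inside the nested loop: it binds the two row indices once and returns the conjunction of two direct three-cell membership scans.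
-- outside the precondition, e.g. on is_candidate_in_both_other_row([], [], 1): A returns False, B raises IndexError
import Mathlib
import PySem

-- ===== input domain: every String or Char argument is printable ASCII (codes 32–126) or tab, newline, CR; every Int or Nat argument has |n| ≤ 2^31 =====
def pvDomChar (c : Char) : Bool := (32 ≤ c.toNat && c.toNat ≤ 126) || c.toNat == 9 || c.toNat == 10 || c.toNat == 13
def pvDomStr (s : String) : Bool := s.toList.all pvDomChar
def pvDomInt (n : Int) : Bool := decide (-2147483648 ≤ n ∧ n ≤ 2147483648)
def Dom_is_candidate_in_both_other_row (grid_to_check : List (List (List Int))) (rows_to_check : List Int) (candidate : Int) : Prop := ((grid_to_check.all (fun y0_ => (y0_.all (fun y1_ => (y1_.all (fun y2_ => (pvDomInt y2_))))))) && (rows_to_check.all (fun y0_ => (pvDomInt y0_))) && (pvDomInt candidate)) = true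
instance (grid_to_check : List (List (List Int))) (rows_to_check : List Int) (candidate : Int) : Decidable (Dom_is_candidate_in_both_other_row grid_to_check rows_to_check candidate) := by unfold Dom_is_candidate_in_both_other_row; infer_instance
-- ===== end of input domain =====

-- B drops the two materialized candidate lists: it binds the two row indices once and does two
-- direct membership scans over the three cells of each row (objective: simpler).

-- ===== PORT A =====
def is_candidate_in_both_other_row (grid_to_check : List (List (List Int))) (rows_to_check : List Int) (candidate : Int) : Bool :=
  let st :=
    rows_to_check.foldl (fun (st : List Int × List Int) row =>
      (PySem.List.pyRange 0 3 1).foldl (fun (st : List Int × List Int) column =>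
        let cell := PySem.List.pyGetD (PySem.List.pyGetD grid_to_check row []) column []
        let st := if row = PySem.List.pyGetD rows_to_check 0 0 ∧ 0 < cell.length
                  then (st.1 ++ cell, st.2) else st
        let st := if row = PySem.List.pyGetD rows_to_check 1 0 ∧ 0 < cell.length
                  then (st.1, st.2 ++ cell) else st
        st) st) ([], [])
  let is_candidate_in_first_row := st.1.contains candidate
  let is_candidate_in_second_row := st.2.contains candidate
  is_candidate_in_first_row && is_candidate_in_second_row

-- ===== PORT B =====
def is_candidate_in_both_other_row_alt (grid_to_check : List (List (List Int))) (rows_to_check : List Int) (candidate : Int) : Bool :=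
  let row_0 := PySem.List.pyGetD rows_to_check 0 0
  let row_1 := PySem.List.pyGetD rows_to_check 1 0
  let in_first := (PySem.List.pyRange 0 3 1).any (fun column =>
    (PySem.List.pyGetD (PySem.List.pyGetD grid_to_check row_0 []) column []).contains candidate)
  let in_second := (PySem.List.pyRange 0 3 1).any (fun column =>
    (PySem.List.pyGetD (PySem.List.pyGetD grid_to_check row_1 []) column []).contains candidate)
  in_first && in_second

-- ===== PRECONDITION & SPEC =====
-- Pre_ excludes exactly the raising inputs (fewer than two row indices while rows_to_check is
-- non-empty, or one of the two listed rows out of range / shorter than 3 cells), plus the empty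
-- rows_to_check list, on which A happens to return False without ever evaluating
-- rows_to_check[0]/[1] while B (which reads both) raises.
def Pre_is_candidate_in_both_other_row (grid_to_check : List (List (List Int))) (rows_to_check : List Int) (candidate : Int) : Prop :=
  2 ≤ rows_to_check.length ∧
  ∀ r ∈ [PySem.List.pyGetD rows_to_check 0 0, PySem.List.pyGetD rows_to_check 1 0],
    PySem.Raise.InRange grid_to_check.length r ∧
    3 ≤ (PySem.List.pyGetD grid_to_check r []).length
instance (grid_to_check : List (List (List Int))) (rows_to_check : List Int) (candidate : Int) : Decidable (Pre_is_candidate_in_both_other_row grid_to_check rows_to_check candidate) := by unfold Pre_is_candidate_in_both_other_row; infer_instance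

def pvWitness_is_candidate_in_both_other_row : List (List (List Int)) × List Int × Int :=
  ([[[1], [2], []], [[3], [], [1, 4]]], [0, 1], 1)

def Spec_is_candidate_in_both_other_row (grid_to_check : List (List (List Int))) (rows_to_check : List Int) (candidate : Int) (out : Bool) : Prop := out = is_candidate_in_both_other_row_alt grid_to_check rows_to_check candidate
instance (grid_to_check : List (List (List Int))) (rows_to_check : List Int) (candidate : Int) (out : Bool) : Decidable (Spec_is_candidate_in_both_other_row grid_to_check rows_to_check candidate out) := by unfold Spec_is_candidate_in_both_other_row; infer_instance

-- ===== CLAIM (what is proved, stated in full; the proofs are below) =====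
def Claim_equal_is_candidate_in_both_other_row : Prop := ∀ (grid_to_check : List (List (List Int))) (rows_to_check : List Int) (candidate : Int), Dom_is_candidate_in_both_other_row grid_to_check rows_to_check candidate → Pre_is_candidate_in_both_other_row grid_to_check rows_to_check candidate → Spec_is_candidate_in_both_other_row grid_to_check rows_to_check candidate (is_candidate_in_both_other_row grid_to_check rows_to_check candidate)
-- ===== LEMMAS AND PROOFS =====

-- contents of the three cells of row r, concatenated (what A's inner loop appends for a matching row)
def pvBody (g : List (List (List Int))) (r : Int) : List Int :=
  PySem.List.pyGetD (PySem.List.pyGetD g r []) 0 [] ++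
  PySem.List.pyGetD (PySem.List.pyGetD g r []) 1 [] ++
  PySem.List.pyGetD (PySem.List.pyGetD g r []) 2 []

-- appending a cell only when it is non-empty appends it unconditionally (first component)
theorem pv_stepA (a b cell : List Int) (p : Prop) [Decidable p] :
    (if p ∧ 0 < cell.length then (a ++ cell, b) else (a, b))
      = (a ++ (if p then cell else []), b) := by
  by_cases hp : p <;> cases cell <;> simp [hp]

-- same for the second component
theorem pv_stepB (a b cell : List Int) (p : Prop) [Decidable p] :
    (if p ∧ 0 < cell.length then (a, b ++ cell) else (a, b))
      = (a, b ++ (if p then cell else [])) := by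
  by_cases hp : p <;> cases cell <;> simp [hp]

-- one outer-loop iteration of A's fold, characterized
theorem pv_rowstep (g : List (List (List Int))) (rows : List Int) (st : List Int × List Int) (row : Int) :
    (PySem.List.pyRange 0 3 1).foldl (fun (st : List Int × List Int) column =>
        let cell := PySem.List.pyGetD (PySem.List.pyGetD g row []) column []
        let st := if row = PySem.List.pyGetD rows 0 0 ∧ 0 < cell.length
                  then (st.1 ++ cell, st.2) else st
        let st := if row = PySem.List.pyGetD rows 1 0 ∧ 0 < cell.length
                  then (st.1, st.2 ++ cell) else st
        st) st
    = (st.1 ++ (if row = PySem.List.pyGetD rows 0 0 then pvBody g row else []),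
       st.2 ++ (if row = PySem.List.pyGetD rows 1 0 then pvBody g row else [])) := by
  obtain ⟨s1, s2⟩ := st
  have h3 : PySem.List.pyRange 0 3 1 = [0, 1, 2] := by decide
  rw [h3]
  simp only [List.foldl, pv_stepA, pv_stepB]
  split_ifs <;> simp [pvBody]

-- membership in A's accumulated lists, by induction over the row list
theorem pv_mem_fold (g : List (List (List Int))) (rows : List Int) (candidate : Int) :
    ∀ (rows' : List Int) (st : List Int × List Int),
    (candidate ∈ (rows'.foldl (fun (st : List Int × List Int) row =>
      (PySem.List.pyRange 0 3 1).foldl (fun (st : List Int × List Int) column =>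
        let cell := PySem.List.pyGetD (PySem.List.pyGetD g row []) column []
        let st := if row = PySem.List.pyGetD rows 0 0 ∧ 0 < cell.length
                  then (st.1 ++ cell, st.2) else st
        let st := if row = PySem.List.pyGetD rows 1 0 ∧ 0 < cell.length
                  then (st.1, st.2 ++ cell) else st
        st) st) st).1
      ↔ candidate ∈ st.1 ∨ (PySem.List.pyGetD rows 0 0 ∈ rows' ∧ candidate ∈ pvBody g (PySem.List.pyGetD rows 0 0))) ∧
    (candidate ∈ (rows'.foldl (fun (st : List Int × List Int) row =>
      (PySem.List.pyRange 0 3 1).foldl (fun (st : List Int × List Int) column =>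
        let cell := PySem.List.pyGetD (PySem.List.pyGetD g row []) column []
        let st := if row = PySem.List.pyGetD rows 0 0 ∧ 0 < cell.length
                  then (st.1 ++ cell, st.2) else st
        let st := if row = PySem.List.pyGetD rows 1 0 ∧ 0 < cell.length
                  then (st.1, st.2 ++ cell) else st
        st) st) st).2
      ↔ candidate ∈ st.2 ∨ (PySem.List.pyGetD rows 1 0 ∈ rows' ∧ candidate ∈ pvBody g (PySem.List.pyGetD rows 1 0))) := by
  intro rows'
  induction rows' with
  | nil => intro st; simp
  | cons r rest ih =>
    intro st
    rw [List.foldl_cons, pv_rowstep g rows st r]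
    constructor
    · rw [(ih _).1]
      by_cases h0 : r = PySem.List.pyGetD rows 0 0 <;> simp [h0] <;> tauto
    · rw [(ih _).2]
      by_cases h1 : r = PySem.List.pyGetD rows 1 0 <;> simp [h1] <;> tauto

-- membership in pvBody is B's three-cell scan
theorem pv_body_mem (g : List (List (List Int))) (r : Int) (candidate : Int) :
    ((PySem.List.pyRange 0 3 1).any (fun column =>
      decide (candidate ∈ PySem.List.pyGetD (PySem.List.pyGetD g r []) column [])))
    = decide (candidate ∈ pvBody g r) := by
  have h3 : PySem.List.pyRange 0 3 1 = [0, 1, 2] := by decide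
  rw [h3]
  simp [pvBody, Bool.decide_or]

-- ===== VERDICT (by name: the statement is the Claim_ definition above) =====
theorem is_candidate_in_both_other_row_spec : Claim_equal_is_candidate_in_both_other_row := by
  intro g rows candidate _hDom hPre
  unfold Spec_is_candidate_in_both_other_row
  unfold is_candidate_in_both_other_row is_candidate_in_both_other_row_alt
  obtain ⟨hlen, -⟩ := hPre
  have h0 : PySem.List.pyGetD rows 0 0 ∈ rows := by
    apply PySem.List.pyGetD_mem; unfold PySem.Raise.InRange; omega
  have h1 : PySem.List.pyGetD rows 1 0 ∈ rows := by
    apply PySem.List.pyGetD_mem; unfold PySem.Raise.InRange; omega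
  have hm := pv_mem_fold g rows candidate rows ([], [])
  have e1 : (candidate ∈ (rows.foldl (fun (st : List Int × List Int) row =>
      (PySem.List.pyRange 0 3 1).foldl (fun (st : List Int × List Int) column =>
        let cell := PySem.List.pyGetD (PySem.List.pyGetD g row []) column []
        let st := if row = PySem.List.pyGetD rows 0 0 ∧ 0 < cell.length
                  then (st.1 ++ cell, st.2) else st
        let st := if row = PySem.List.pyGetD rows 1 0 ∧ 0 < cell.length
                  then (st.1, st.2 ++ cell) else st
        st) st) ([], [])).1) ↔ candidate ∈ pvBody g (PySem.List.pyGetD rows 0 0) := by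
    rw [hm.1]; simp [h0]
  have e2 : (candidate ∈ (rows.foldl (fun (st : List Int × List Int) row =>
      (PySem.List.pyRange 0 3 1).foldl (fun (st : List Int × List Int) column =>
        let cell := PySem.List.pyGetD (PySem.List.pyGetD g row []) column []
        let st := if row = PySem.List.pyGetD rows 0 0 ∧ 0 < cell.length
                  then (st.1 ++ cell, st.2) else st
        let st := if row = PySem.List.pyGetD rows 1 0 ∧ 0 < cell.length
                  then (st.1, st.2 ++ cell) else st
        st) st) ([], [])).2) ↔ candidate ∈ pvBody g (PySem.List.pyGetD rows 1 0) := by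
    rw [hm.2]; simp [h1]
  simp only [List.contains_eq_mem, decide_eq_decide.mpr e1, decide_eq_decide.mpr e2, pv_body_mem]
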